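-- pv_equiv track=rewrite | github.com/lixelv/planebot | utils.py | calculate_plane
-- ===== SOURCE A (Python) =====
-- def calculate_plane(x0, y0, z0, x1, y1, z1, x2, y2, z2):
--     a = ((z2-z0)*(y1-y0)-(z1-z0)*(y2-y0))
--     b = ((x2-x0)*(z1-z0)-(x1-x0)*(z2-z0))
--     c = ((y2-y0)*(x1-x0)-(y1-y0)*(x2-x0))
--     d = -(a*x0+b*y0+c*z0)
--
--     result = [a, b, c, d]
--
--     i = 2
--     smallest = min([abs(j) for j in result if j != 0])
--
--     while i <= smallest:
--         for j in result:
--             if j % i != 0: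
--                 break
--         else:
--             result = [j//i for j in result]
--             i-=1
--
--         i += 1
--
--     if len([i for i in result if i < 0]) > (len([i for i in result if i != 0])//2):
--         result = [-j for j in result]
--
--     return result
-- ===== SOURCE B (Python) =====
-- def _gcd(a, b):
--     while b > 0:
--         a, b = b, a % b
--     return a
--
--
-- def calculate_plane(x0, y0, z0, x1, y1, z1, x2, y2, z2):
--     a = ((z2-z0)*(y1-y0)-(z1-z0)*(y2-y0))
--     b = ((x2-x0)*(z1-z0)-(x1-x0)*(z2-z0))
--     c = ((y2-y0)*(x1-x0)-(y1-y0)*(x2-x0))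
--     d = -(a*x0+b*y0+c*z0)
--
--     g = 0
--     for v in (a, b, c, d):
--         g = _gcd(g, abs(v))
--
--     result = [a // g, b // g, c // g, d // g]
--
--     if len([j for j in result if j < 0]) > (len([j for j in result if j != 0]) // 2):
--         result = [-j for j in result]
--
--     return result
-- ===== Notes on version B (the rewrite author's own statement) =====
-- stated objective: faster
-- what changed: The trial-division reduction loop (try every candidate i from 2 up to the smallest nonzero |coefficient|, dividing the whole list whenever i divides all entries) is replaced by one Euclidean-gcd fold over the four coefficients followed by a single division of each coefficient; the cross-product and sign-normalization steps are unchanged. Pre_ excludes only the collinear (all-coefficients-zero) inputs, on which both A and B raise.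
import Mathlib
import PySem

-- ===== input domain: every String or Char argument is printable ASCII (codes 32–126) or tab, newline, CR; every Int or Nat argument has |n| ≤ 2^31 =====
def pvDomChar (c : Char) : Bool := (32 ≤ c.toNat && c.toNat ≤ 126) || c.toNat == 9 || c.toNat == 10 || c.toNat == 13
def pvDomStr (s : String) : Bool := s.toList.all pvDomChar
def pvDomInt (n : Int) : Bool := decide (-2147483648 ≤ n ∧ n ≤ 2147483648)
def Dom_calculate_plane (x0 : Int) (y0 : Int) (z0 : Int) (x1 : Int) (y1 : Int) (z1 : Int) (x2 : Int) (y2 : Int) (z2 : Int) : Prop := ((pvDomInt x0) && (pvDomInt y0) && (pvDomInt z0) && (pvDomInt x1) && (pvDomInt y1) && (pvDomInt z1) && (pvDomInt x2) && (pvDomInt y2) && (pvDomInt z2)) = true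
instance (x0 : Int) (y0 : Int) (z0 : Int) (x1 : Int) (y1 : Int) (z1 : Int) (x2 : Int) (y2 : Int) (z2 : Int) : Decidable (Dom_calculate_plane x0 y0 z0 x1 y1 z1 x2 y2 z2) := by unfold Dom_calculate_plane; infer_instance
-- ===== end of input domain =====

-- B replaces A's trial-division reduction loop with a Euclidean-gcd fold and one division
-- per coefficient (asymptotically faster); cross product and sign normalization unchanged.
-- On collinear points (all coefficients 0) both programs raise (A: ValueError, B:
-- ZeroDivisionError); those inputs are outside Pre_.

-- ===== PORT A =====
-- inner `for j in result: if j % i != 0: break / else:` check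
def pvAllDiv (ys : List Int) (i : Int) : Bool := ys.all (fun j => PySem.Int.mod j i == 0)

-- the `while i <= smallest` loop; fuel only makes the recursion total (proved sufficient below)
def pvLoopA (smallest : Int) : Nat → List Int → Int → List Int
  | 0, ys, _ => ys
  | fuel+1, ys, i =>
    if i ≤ smallest then
      if pvAllDiv ys i then pvLoopA smallest fuel (ys.map (fun j => PySem.Int.floordiv j i)) i
      else pvLoopA smallest fuel ys (i+1)
    else ys

-- everything A does after computing the four coefficients
def pvTailA (a b c d : Int) : List Int :=
  let result := [a, b, c, d]
  match PySem.List.min? ((result.filter (fun j => j != 0)).map (fun j => |j|)) (fun x => x) with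
  | none => []   -- Python: min([]) raises ValueError; excluded by Pre_
  | some smallest =>
    let result := pvLoopA smallest (2 * smallest.toNat + 2) result 2
    if (result.filter (fun i => i < 0)).length > (result.filter (fun i => i != 0)).length / 2 then
      result.map (fun j => -j)
    else result

def calculate_plane (x0 : Int) (y0 : Int) (z0 : Int) (x1 : Int) (y1 : Int) (z1 : Int) (x2 : Int) (y2 : Int) (z2 : Int) : List Int :=
  let a := ((z2-z0)*(y1-y0)-(z1-z0)*(y2-y0))
  let b := ((x2-x0)*(z1-z0)-(x1-x0)*(z2-z0))
  let c := ((y2-y0)*(x1-x0)-(y1-y0)*(x2-x0))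
  let d := -(a*x0+b*y0+c*z0)
  pvTailA a b c d

-- ===== PORT B =====
-- Source B's hand-written Euclid `while b > 0: a, b = b, a % b`
def pvGcd (a b : Int) : Int :=
  if h : 0 < b then pvGcd b (PySem.Int.mod a b) else a
  termination_by b.toNat
  decreasing_by
    have h1 := PySem.Int.mod_nonneg a h
    have h2 := PySem.Int.mod_lt a h
    omega

-- everything B does after computing the four coefficients
def pvTailB (a b c d : Int) : List Int :=
  let g := [a, b, c, d].foldl (fun g v => pvGcd g |v|) 0
  let result := [PySem.Int.floordiv a g, PySem.Int.floordiv b g, PySem.Int.floordiv c g, PySem.Int.floordiv d g]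
  if (result.filter (fun j => j < 0)).length > (result.filter (fun j => j != 0)).length / 2 then
    result.map (fun j => -j)
  else result

def calculate_plane_alt (x0 : Int) (y0 : Int) (z0 : Int) (x1 : Int) (y1 : Int) (z1 : Int) (x2 : Int) (y2 : Int) (z2 : Int) : List Int :=
  let a := ((z2-z0)*(y1-y0)-(z1-z0)*(y2-y0))
  let b := ((x2-x0)*(z1-z0)-(x1-x0)*(z2-z0))
  let c := ((y2-y0)*(x1-x0)-(y1-y0)*(x2-x0))
  let d := -(a*x0+b*y0+c*z0)
  pvTailB a b c d

-- ===== PRECONDITION & SPEC =====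
-- Pre_ excludes exactly the degenerate (collinear) point triples: there all four plane
-- coefficients are 0 and A raises ValueError (min of an empty list); B raises there too.
def Pre_calculate_plane (x0 : Int) (y0 : Int) (z0 : Int) (x1 : Int) (y1 : Int) (z1 : Int) (x2 : Int) (y2 : Int) (z2 : Int) : Prop :=
  ¬(((z2-z0)*(y1-y0)-(z1-z0)*(y2-y0)) = 0 ∧ ((x2-x0)*(z1-z0)-(x1-x0)*(z2-z0)) = 0 ∧ ((y2-y0)*(x1-x0)-(y1-y0)*(x2-x0)) = 0)
instance (x0 : Int) (y0 : Int) (z0 : Int) (x1 : Int) (y1 : Int) (z1 : Int) (x2 : Int) (y2 : Int) (z2 : Int) : Decidable (Pre_calculate_plane x0 y0 z0 x1 y1 z1 x2 y2 z2) := by unfold Pre_calculate_plane; infer_instance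

def pvWitness_calculate_plane : Int × Int × Int × Int × Int × Int × Int × Int × Int := (0, 0, 0, 1, 0, 0, 0, 1, 0)

def Spec_calculate_plane (x0 : Int) (y0 : Int) (z0 : Int) (x1 : Int) (y1 : Int) (z1 : Int) (x2 : Int) (y2 : Int) (z2 : Int) (out : List Int) : Prop := out = calculate_plane_alt x0 y0 z0 x1 y1 z1 x2 y2 z2
instance (x0 : Int) (y0 : Int) (z0 : Int) (x1 : Int) (y1 : Int) (z1 : Int) (x2 : Int) (y2 : Int) (z2 : Int) (out : List Int) : Decidable (Spec_calculate_plane x0 y0 z0 x1 y1 z1 x2 y2 z2 out) := by unfold Spec_calculate_plane; infer_instance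

-- ===== CLAIM (what is proved, stated in full; the proofs are below) =====
def Claim_equal_calculate_plane : Prop := ∀ (x0 : Int) (y0 : Int) (z0 : Int) (x1 : Int) (y1 : Int) (z1 : Int) (x2 : Int) (y2 : Int) (z2 : Int), Dom_calculate_plane x0 y0 z0 x1 y1 z1 x2 y2 z2 → Pre_calculate_plane x0 y0 z0 x1 y1 z1 x2 y2 z2 → Spec_calculate_plane x0 y0 z0 x1 y1 z1 x2 y2 z2 (calculate_plane x0 y0 z0 x1 y1 z1 x2 y2 z2)

-- ===== LEMMAS AND PROOFS =====

-- gcd (as a Nat) of a list of Ints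
def gcdL (l : List Int) : Nat := l.foldr (fun x g => Nat.gcd x.natAbs g) 0

lemma dvd_gcdL_iff (d : Nat) (l : List Int) : d ∣ gcdL l ↔ ∀ x ∈ l, d ∣ x.natAbs := by
  induction l with
  | nil => simp [gcdL]
  | cons x t ih =>
    simp only [gcdL, List.foldr] at *
    constructor
    · intro h y hy
      rcases List.mem_cons.mp hy with rfl | hy
      · exact dvd_trans h (Nat.gcd_dvd_left _ _)
      · exact (ih.mp (dvd_trans h (Nat.gcd_dvd_right _ _))) y hy
    · intro h
      exact Nat.dvd_gcd (h x (by simp)) (ih.mpr fun y hy => h y (by simp [hy]))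

lemma gcdL_dvd {l : List Int} {x : Int} (hx : x ∈ l) : gcdL l ∣ x.natAbs :=
  (dvd_gcdL_iff (gcdL l) l).mp dvd_rfl x hx

lemma gcdL_map_mul (c : Nat) (l : List Int) : gcdL (l.map (fun y => (c : Int) * y)) = c * gcdL l := by
  induction l with
  | nil => simp [gcdL]
  | cons x t ih =>
    simp only [gcdL, List.map, List.foldr] at *
    rw [ih, Int.natAbs_mul, Int.natAbs_natCast, Nat.gcd_mul_left]

lemma gcdL_eq_zero_iff (l : List Int) : gcdL l = 0 ↔ ∀ x ∈ l, x = 0 := by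
  induction l with
  | nil => simp [gcdL]
  | cons x t ih =>
    simp only [gcdL, List.foldr] at *
    rw [Nat.gcd_eq_zero_iff, ih, Int.natAbs_eq_zero]
    simp

lemma pvLoopA_spec (xs : List Int) (smallest : Int)
    (hsm : (gcdL xs : Int) ≤ smallest) :
    ∀ (fuel : Nat) (ys : List Int) (i : Int) (k : Nat),
      0 < k → xs = ys.map (fun y => (k : Int) * y) →
      (∀ d : Nat, 2 ≤ d → (d : Int) < i → ¬ (d ∣ gcdL ys)) →
      2 ≤ i → gcdL ys ≠ 0 →
      (smallest + 1 - i).toNat + gcdL ys ≤ fuel →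
      pvLoopA smallest fuel ys i = xs.map (fun x => PySem.Int.floordiv x (gcdL xs)) := by
  intro fuel
  induction fuel with
  | zero =>
    intro ys i k hk hys hmin hi hnz hfuel
    omega
  | succ fuel ih =>
    intro ys i k hk hys hmin hi hnz hfuel
    have hipos : (0:Int) < i := by omega
    have hiN : ((i.toNat : Nat) : Int) = i := Int.toNat_of_nonneg (by omega)
    by_cases hle : i ≤ smallest
    · rw [pvLoopA, if_pos hle]
      by_cases hall : pvAllDiv ys i = true
      · rw [if_pos hall]
        -- every entry divisible by i: divide the list, keep i
        have hdvd : ∀ j ∈ ys, i ∣ j := by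
          intro j hj
          have := (List.all_eq_true.mp hall) j hj
          simp only [beq_iff_eq] at this
          exact (PySem.Int.mod_eq_zero_iff_dvd j i).mp this
        have hrepr : (ys.map (fun j => PySem.Int.floordiv j i)).map (fun y => ((i.toNat : Nat) : Int) * y) = ys := by
          rw [List.map_map]
          have : ∀ j ∈ ys, ((fun y => ((i.toNat : Nat) : Int) * y) ∘ (fun j => PySem.Int.floordiv j i)) j = id j := by
            intro j hj
            simp only [Function.comp, id, hiN]
            rw [PySem.Int.floordiv_eq_ediv_of_pos hipos]
            exact Int.mul_ediv_cancel' (hdvd j hj)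
          rw [List.map_congr_left this, List.map_id]
        have hgys : gcdL ys = i.toNat * gcdL (ys.map (fun j => PySem.Int.floordiv j i)) := by
          conv_lhs => rw [← hrepr]
          exact gcdL_map_mul _ _
        have hiN2 : 2 ≤ i.toNat := by omega
        have hnz' : gcdL (ys.map (fun j => PySem.Int.floordiv j i)) ≠ 0 := by
          intro h0; rw [h0, Nat.mul_zero] at hgys; exact hnz hgys
        have hlt : gcdL (ys.map (fun j => PySem.Int.floordiv j i)) < gcdL ys := by
          have h1 : 1 ≤ gcdL (ys.map (fun j => PySem.Int.floordiv j i)) := Nat.one_le_iff_ne_zero.mpr hnz'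
          have h2 : 2 * gcdL (ys.map (fun j => PySem.Int.floordiv j i)) ≤ i.toNat * gcdL (ys.map (fun j => PySem.Int.floordiv j i)) :=
            Nat.mul_le_mul_right _ hiN2
          omega
        refine ih _ i (k * i.toNat) (by positivity) ?_ ?_ hi hnz' (by omega)
        · rw [hys]
          conv_lhs => rw [← hrepr]
          rw [List.map_map]
          apply List.map_congr_left
          intro j _
          simp only [Function.comp]
          push_cast
          ring
        · intro d hd2 hdi hddvd
          exact hmin d hd2 hdi (hgys ▸ hddvd.mul_left i.toNat)
      · rw [if_neg hall]
        -- some entry not divisible by i: advance i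
        have hex : ∃ j ∈ ys, ¬ i ∣ j := by
          simp only [pvAllDiv, List.all_eq_true, beq_iff_eq] at hall
          push_neg at hall
          obtain ⟨j, hj, hjm⟩ := hall
          exact ⟨j, hj, fun hd => hjm ((PySem.Int.mod_eq_zero_iff_dvd j i).mpr hd)⟩
        refine ih ys (i+1) k hk hys ?_ (by omega) hnz (by omega)
        intro d hd2 hdi hddvd
        by_cases hlt : (d : Int) < i
        · exact hmin d hd2 hlt hddvd
        · have hdeq : (d : Int) = i := by omega
          obtain ⟨j, hj, hjd⟩ := hex
          apply hjd
          have h1 : d ∣ j.natAbs := dvd_trans hddvd (gcdL_dvd hj)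
          have h2 : ((d : Nat) : Int) ∣ j := Int.dvd_natAbs.mp (Int.natCast_dvd_natCast.mpr h1)
          rwa [hdeq] at h2
    · rw [pvLoopA, if_neg hle]
      -- loop finished: gcd of ys must be 1, so k = gcdL xs
      have hG : gcdL xs = k * gcdL ys := by rw [hys]; exact gcdL_map_mul k ys
      have h1 : gcdL ys = 1 := by
        by_contra h1
        have h2 : 2 ≤ gcdL ys := by omega
        apply hmin (gcdL ys) h2 _ dvd_rfl
        have hle' : gcdL ys ≤ gcdL xs := by
          rw [hG]; exact Nat.le_mul_of_pos_left _ hk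
        have : (gcdL ys : Int) ≤ (gcdL xs : Int) := by exact_mod_cast hle'
        omega
      have hkG : k = gcdL xs := by rw [hG, h1, Nat.mul_one]
      rw [← hkG, hys, List.map_map]
      symm
      have : ∀ y ∈ ys, ((fun x => PySem.Int.floordiv x (k : Int)) ∘ (fun y => (k : Int) * y)) y = id y := by
        intro y _
        have hkpos : (0:Int) < (k : Int) := by exact_mod_cast hk
        simp only [Function.comp, id]
        rw [PySem.Int.floordiv_eq_ediv_of_pos hkpos]
        exact Int.mul_ediv_cancel_left y (by omega)
      rw [List.map_congr_left this, List.map_id]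

lemma pvGcd_eq (bN : Nat) : ∀ (aN : Nat), pvGcd (aN : Int) (bN : Int) = (Nat.gcd aN bN : Int) := by
  induction bN using Nat.strong_induction_on with
  | _ bN ih =>
    intro aN
    by_cases hb : bN = 0
    · subst hb
      rw [pvGcd, dif_neg (by omega)]
      simp
    · rw [pvGcd, dif_pos (by exact_mod_cast Nat.pos_of_ne_zero hb)]
      rw [PySem.Int.mod_natCast]
      rw [ih (aN % bN) (Nat.mod_lt _ (Nat.pos_of_ne_zero hb))]
      rw [Nat.gcd_comm aN bN, Nat.gcd_rec bN aN, Nat.gcd_comm (aN % bN) bN]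

lemma pvGcd_cast_abs (g : Nat) (v : Int) : pvGcd (g : Int) |v| = (Nat.gcd g v.natAbs : Int) := by
  rw [Int.abs_eq_natAbs]
  exact pvGcd_eq v.natAbs g

lemma tail_eq (a b c d : Int) (hne : ¬(a = 0 ∧ b = 0 ∧ c = 0 ∧ d = 0)) :
    pvTailA a b c d = pvTailB a b c d := by
  have hGdef : gcdL [a, b, c, d] = Nat.gcd a.natAbs (Nat.gcd b.natAbs (Nat.gcd c.natAbs (Nat.gcd d.natAbs 0))) := by
    simp [gcdL]
  -- B's gcd fold equals gcdL
  have hg : [a, b, c, d].foldl (fun g v => pvGcd g |v|) 0 = ((gcdL [a, b, c, d] : Nat) : Int) := by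
    simp only [List.foldl]
    rw [show (0 : Int) = ((0 : Nat) : Int) from rfl, pvGcd_cast_abs, pvGcd_cast_abs, pvGcd_cast_abs, pvGcd_cast_abs, hGdef]
    rw [Nat.gcd_zero_left]
    rw [Nat.gcd_assoc, Nat.gcd_assoc]
    simp [Nat.gcd_zero_right]
  -- the min? is some
  rcases hmin : PySem.List.min? ((([a, b, c, d]).filter (fun j => j != 0)).map (fun j => |j|)) (fun x => x) with _ | m
  · exfalso
    rw [PySem.List.min?_eq_none_iff] at hmin
    rw [List.map_eq_nil_iff, List.filter_eq_nil_iff] at hmin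
    simp only [bne_iff_ne, ne_eq, not_not] at hmin
    exact hne ⟨hmin a (by simp), hmin b (by simp), hmin c (by simp), hmin d (by simp)⟩
  · -- m = |x| for some nonzero x in the list
    have hmem := PySem.List.min?_mem hmin
    obtain ⟨x, hxf, hxm⟩ := List.mem_map.mp hmem
    have hxl : x ∈ [a, b, c, d] := List.mem_of_mem_filter hxf
    have hxne : x ≠ 0 := by
      have := List.of_mem_filter hxf
      simpa using this
    have hm1 : 1 ≤ m := by
      have hax : 0 < |x| := abs_pos.mpr hxne
      omega
    have hGnz : gcdL [a, b, c, d] ≠ 0 := by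
      intro h0
      exact hxne ((gcdL_eq_zero_iff _).mp h0 x hxl)
    have hGle : (gcdL [a, b, c, d] : Int) ≤ m := by
      have h1 : gcdL [a, b, c, d] ∣ x.natAbs := gcdL_dvd hxl
      have h2 : gcdL [a, b, c, d] ≤ x.natAbs := Nat.le_of_dvd (by omega) h1
      have h3 : m = (x.natAbs : Int) := by rw [← hxm, Int.abs_eq_natAbs]
      rw [h3]
      exact_mod_cast h2
    have hloop := pvLoopA_spec [a, b, c, d] m hGle (2 * m.toNat + 2) [a, b, c, d] 2 1
      (by omega) (by simp) (by intro d hd2 hdi; exfalso; omega) (by omega) hGnz (by omega)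
    show pvTailA a b c d = pvTailB a b c d
    simp only [pvTailA, pvTailB, hmin, hg, hloop]
    simp [List.map]

-- ===== VERDICT (by name: the statement is the Claim_ definition above) =====
theorem calculate_plane_spec : Claim_equal_calculate_plane := by
  intro x0 y0 z0 x1 y1 z1 x2 y2 z2 _ hpre
  unfold Spec_calculate_plane calculate_plane calculate_plane_alt
  apply tail_eq
  unfold Pre_calculate_plane at hpre
  intro ⟨ha, hb, hc, _⟩
  exact hpre ⟨ha, hb, hc⟩
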